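-- pv_equiv track=rewrite | github.com/MaxiMo3301/Luna-Cat-AI-Development | src/fall_detection_models/human-estimation-001_plus_tracker/utils.py | find_isp_scale_params
-- ===== SOURCE A (Python) =====
-- from math import gcd
--
-- def find_isp_scale_params(size, is_height=True):
--     """
--     Find closest valid size close to 'size' and and the corresponding parameters to setIspScale()
--     This function is useful to work around a bug in depthai where ImageManip is scrambling images that have an invalid size
--     is_height : boolean that indicates if the value is the height or the width of the image
--     Returns: valid size, (numerator, denominator)
--     """
--     # We want size >= 288
--     if size < 288:
--         size = 288
--
--     # We are looking for the list on integers that are divisible by 16 and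
--     # that can be written like n/d where n <= 16 and d <= 63
--     if is_height:
--         reference = 1080
--         other = 1920
--     else:
--         reference = 1920
--         other = 1080
--     size_candidates = {}
--     for s in range(288, reference, 16):
--         f = gcd(reference, s)
--         n = s // f
--         d = reference // f
--         if n <= 16 and d <= 63 and int(round(other * n / d) % 2 == 0):
--             size_candidates[s] = (n, d)
--
--     # What is the candidate size closer to 'size' ?
--     min_dist = -1
--     for s in size_candidates:
--         dist = abs(size - s)
--         if min_dist == -1:
--             min_dist = dist
--             candidate = s
--         else:
--             if dist > min_dist: break
--             candidate = s
--             min_dist = dist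
--     return candidate, size_candidates[candidate]
-- ===== SOURCE B (Python) =====
-- from math import gcd
--
-- def _valid_params(reference, other, s):
--     """Return (n, d) if s is a valid ISP scale of 'reference', else None."""
--     f = gcd(reference, s)
--     n = s // f
--     d = reference // f
--     if n <= 16 and d <= 63 and int(round(other * n / d) % 2 == 0):
--         return (n, d)
--     return None
--
-- def find_isp_scale_params(size, is_height=True):
--     """Single fused pass: instead of building a candidate table and re-scanning
--     it, track the running best (dist <= best_dist, so ties go to the larger s)."""
--     if size < 288:
--         size = 288
--     if is_height:
--         reference = 1080
--         other = 1920
--     else: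
--         reference = 1920
--         other = 1080
--     best = None
--     for s in range(288, reference, 16):
--         nd = _valid_params(reference, other, s)
--         if nd is not None:
--             dist = abs(size - s)
--             if best is None or dist <= best[2]:
--                 best = (s, nd, dist)
--     return best[0], best[1]
-- ===== Notes on version B (the rewrite author's own statement) =====
-- stated objective: simpler
-- what changed: B fuses A's two passes (build a size->params dict over the range, then re-scan the dict keys with a break on growing distance) into one loop over the range that keeps a single running-best candidate (updated on dist <= best_dist, so ties go to the larger size), eliminating the dict entirely.
import Mathlib
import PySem

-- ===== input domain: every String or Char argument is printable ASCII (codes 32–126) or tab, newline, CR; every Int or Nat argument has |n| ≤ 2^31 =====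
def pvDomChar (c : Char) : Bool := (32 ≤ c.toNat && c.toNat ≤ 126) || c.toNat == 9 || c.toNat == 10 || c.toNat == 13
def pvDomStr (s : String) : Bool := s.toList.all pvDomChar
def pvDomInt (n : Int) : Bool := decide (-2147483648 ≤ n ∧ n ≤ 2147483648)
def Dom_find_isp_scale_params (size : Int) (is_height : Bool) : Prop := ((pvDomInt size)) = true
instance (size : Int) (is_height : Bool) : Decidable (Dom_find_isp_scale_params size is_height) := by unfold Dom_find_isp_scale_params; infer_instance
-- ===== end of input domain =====

-- B replaces A's two passes (build a candidate dict, then re-scan it with a break) by one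
-- fused loop that keeps a running best candidate; objective: simpler.

-- ===== PORT A =====

-- math.gcd on the (nonnegative) ints used here
def pvGcd (a b : Int) : Int := (Int.gcd a b : Int)

-- integer port of int(round(a / b)) for b > 0: Python rounds the float a/b half-to-even;
-- on every operand pair this code can produce (other*n ≤ 30720, d ≤ 63, checked exhaustively)
-- the float result equals exact half-to-even rational rounding, as computed here
def pvRound (a b : Int) : Int :=
  let q := PySem.Int.floordiv a b
  let r := PySem.Int.mod a b
  if 2 * r < b then q
  else if b < 2 * r then q + 1
  else if PySem.Int.mod q 2 = 0 then q else q + 1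

-- A's first loop: build the size_candidates dict
def pvBuildCandidates (reference other : Int) : PySem.Dict Int (Int × Int) :=
  (PySem.List.pyRange 288 reference 16).foldl (fun dict s =>
    let f := pvGcd reference s
    let n := PySem.Int.floordiv s f
    let d := PySem.Int.floordiv reference f
    if n ≤ 16 ∧ d ≤ 63 ∧ PySem.Int.mod (pvRound (other * n) d) 2 = 0 then
      dict.insert s (n, d)
    else dict) PySem.Dict.empty

-- A's second loop: scan the keys, break as soon as the distance increases
def pvScan (size : Int) : List Int → Int → Int → Int
  | [], _, candidate => candidate
  | s :: rest, minDist, candidate =>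
    let dist := |size - s|
    if minDist = -1 then pvScan size rest dist s
    else if minDist < dist then candidate
    else pvScan size rest dist s

def find_isp_scale_params (size : Int) (is_height : Bool) : Int × (Int × Int) :=
  let size := if size < 288 then 288 else size
  let reference := if is_height then (1080 : Int) else 1920
  let other := if is_height then (1920 : Int) else 1080
  let sizeCandidates := pvBuildCandidates reference other
  let candidate := pvScan size sizeCandidates.keys (-1) 0
  -- size_candidates[candidate]: the lookup always succeeds (candidate is a key), default unreachable
  (candidate, (sizeCandidates.get? candidate).getD (0, 0))

-- ===== PORT B =====

-- Source B's _valid_params helper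
def pvValidParams (reference other s : Int) : Option (Int × Int) :=
  let f := pvGcd reference s
  let n := PySem.Int.floordiv s f
  let d := PySem.Int.floordiv reference f
  if n ≤ 16 ∧ d ≤ 63 ∧ PySem.Int.mod (pvRound (other * n) d) 2 = 0 then some (n, d) else none

def find_isp_scale_params_alt (size : Int) (is_height : Bool) : Int × (Int × Int) :=
  let size := if size < 288 then 288 else size
  let reference := if is_height then (1080 : Int) else 1920
  let other := if is_height then (1920 : Int) else 1080
  let best := (PySem.List.pyRange 288 reference 16).foldl (fun best s =>
    match pvValidParams reference other s with
    | none => best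
    | some nd =>
      let dist := |size - s|
      match best with
      | none => some (s, nd, dist)
      | some b => if dist ≤ b.2.2 then some (s, nd, dist) else best)
    (none : Option (Int × (Int × Int) × Int))
  match best with
  | some (s, nd, _) => (s, nd)
  | none => (0, (0, 0))  -- unreachable: the candidate set is never empty

-- ===== PRECONDITION & SPEC =====
def Spec_find_isp_scale_params (size : Int) (is_height : Bool) (out : Int × (Int × Int)) : Prop := out = find_isp_scale_params_alt size is_height
instance (size : Int) (is_height : Bool) (out : Int × (Int × Int)) : Decidable (Spec_find_isp_scale_params size is_height out) := by unfold Spec_find_isp_scale_params; infer_instance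

-- ===== CLAIM (what is proved, stated in full; the proofs are below) =====
def Claim_equal_find_isp_scale_params : Prop := ∀ (size : Int) (is_height : Bool), Dom_find_isp_scale_params size is_height → Spec_find_isp_scale_params size is_height (find_isp_scale_params size is_height)

-- ===== LEMMAS AND PROOFS =====



-- proof-only literals: the candidate keys, dict and (key, params) list each branch produces
def pvKsH : List Int := [288, 432, 560, 576, 640, 720, 864, 1008]
def pvDH : PySem.Dict Int (Int × Int) := PySem.Dict.ofList [(288, (4, 15)), (432, (2, 5)), (560, (14, 27)), (576, (8, 15)), (640, (16, 27)), (720, (2, 3)), (864, (4, 5)), (1008, (14, 15))]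
def pvClH : List (Int × Int × Int) := [(288, (4, 15)), (432, (2, 5)), (560, (14, 27)), (576, (8, 15)), (640, (16, 27)), (720, (2, 3)), (864, (4, 5)), (1008, (14, 15))]
def pvKsW : List Int := [288, 320, 352, 384, 416, 448, 480, 512, 576, 640, 672, 704, 768, 800, 832, 864, 896, 960, 1024, 1056, 1120, 1152, 1248, 1280, 1344, 1408, 1440, 1536, 1600, 1664, 1728, 1760, 1792]
def pvDW : PySem.Dict Int (Int × Int) := PySem.Dict.ofList [(288, (3, 20)), (320, (1, 6)), (352, (11, 60)), (384, (1, 5)), (416, (13, 60)), (448, (7, 30)), (480, (1, 4)), (512, (4, 15)), (576, (3, 10)), (640, (1, 3)), (672, (7, 20)), (704, (11, 30)), (768, (2, 5)), (800, (5, 12)), (832, (13, 30)), (864, (9, 20)), (896, (7, 15)), (960, (1, 2)), (1024, (8, 15)), (1056, (11, 20)), (1120, (7, 12)), (1152, (3, 5)), (1248, (13, 20)), (1280, (2, 3)), (1344, (7, 10)), (1408, (11, 15)), (1440, (3, 4)), (1536, (4, 5)), (1600, (5, 6)), (1664, (13, 15)), (1728, (9, 10)), (1760, (11, 12)), (1792,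 (14, 15))]
def pvClW : List (Int × Int × Int) := [(288, (3, 20)), (320, (1, 6)), (352, (11, 60)), (384, (1, 5)), (416, (13, 60)), (448, (7, 30)), (480, (1, 4)), (512, (4, 15)), (576, (3, 10)), (640, (1, 3)), (672, (7, 20)), (704, (11, 30)), (768, (2, 5)), (800, (5, 12)), (832, (13, 30)), (864, (9, 20)), (896, (7, 15)), (960, (1, 2)), (1024, (8, 15)), (1056, (11, 20)), (1120, (7, 12)), (1152, (3, 5)), (1248, (13, 20)), (1280, (2, 3)), (1344, (7, 10)), (1408, (11, 15)), (1440, (3, 4)), (1536, (4, 5)), (1600, (5, 6)), (1664, (13, 15)), (1728, (9, 10)), (1760, (11, 12)), (1792, (14, 15))]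

-- the step function of B's fold, in terms of an already-validated (key, params) entry
def pvBest (m : Int) (acc : Option (Int × (Int × Int) × Int)) (p : Int × Int × Int) :
    Option (Int × (Int × Int) × Int) :=
  let dist := |m - p.1|
  match acc with
  | none => some (p.1, p.2, dist)
  | some b => if dist ≤ b.2.2 then some (p.1, p.2, dist) else acc

-- A after its candidate dict has been evaluated to a literal
def pvCoreA (m : Int) (ks : List Int) (dd : PySem.Dict Int (Int × Int)) : Int × (Int × Int) :=
  let c := pvScan m ks (-1) 0
  (c, (dd.get? c).getD (0, 0))

-- B after its validity filter has been evaluated, folding over the surviving entries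
def pvCoreB (m : Int) (cl : List (Int × Int × Int)) : Int × (Int × Int) :=
  match cl.foldl (pvBest m) none with
  | some (s, nd, _) => (s, nd)
  | none => (0, (0, 0))

set_option maxRecDepth 100000
set_option maxHeartbeats 4000000

lemma portA_eq (size : Int) (h : Bool) :
    find_isp_scale_params size h =
      pvCoreA (if size < 288 then 288 else size) (if h then pvKsH else pvKsW)
        (if h then pvDH else pvDW) := by
  cases h <;> rfl

-- B's fold over the raw range equals a fold of pvBest over the validity-filtered entries
lemma alt_fold_eq (m ref oth : Int) (l : List Int) :
    ∀ init : Option (Int × (Int × Int) × Int),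
      l.foldl (fun best s =>
        match pvValidParams ref oth s with
        | none => best
        | some nd =>
          let dist := |m - s|
          match best with
          | none => some (s, nd, dist)
          | some b => if dist ≤ b.2.2 then some (s, nd, dist) else best) init
      = (l.filterMap (fun s => (pvValidParams ref oth s).map (fun nd => (s, nd)))).foldl
          (pvBest m) init := by
  induction l with
  | nil => intro _; rfl
  | cons s rest ih =>
    intro init
    rw [List.foldl_cons, List.filterMap_cons]
    cases hv : pvValidParams ref oth s with
    | none => exact ih _
    | some nd => simp only [Option.map_some, List.foldl_cons]; exact ih _

lemma pvFilterH : (PySem.List.pyRange 288 1080 16).filterMap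
    (fun s => (pvValidParams 1080 1920 s).map (fun nd => (s, nd))) = pvClH := by decide

lemma pvFilterW : (PySem.List.pyRange 288 1920 16).filterMap
    (fun s => (pvValidParams 1920 1080 s).map (fun nd => (s, nd))) = pvClW := by decide

lemma portB_eq (size : Int) (h : Bool) :
    find_isp_scale_params_alt size h =
      pvCoreB (if size < 288 then 288 else size) (if h then pvClH else pvClW) := by
  cases h
  · show (match (PySem.List.pyRange 288 1920 16).foldl (fun best s =>
        match pvValidParams 1920 1080 s with
        | none => best
        | some nd =>
          let dist := |(if size < 288 then 288 else size) - s|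
          match best with
          | none => some (s, nd, dist)
          | some b => if dist ≤ b.2.2 then some (s, nd, dist) else best)
        (none : Option (Int × (Int × Int) × Int)) with
      | some (s, nd, _) => (s, nd)
      | none => ((0 : Int), ((0 : Int), (0 : Int)))) =
      pvCoreB (if size < 288 then 288 else size) pvClW
    rw [alt_fold_eq, pvFilterW]; rfl
  · show (match (PySem.List.pyRange 288 1080 16).foldl (fun best s =>
        match pvValidParams 1080 1920 s with
        | none => best
        | some nd =>
          let dist := |(if size < 288 then 288 else size) - s|
          match best with
          | none => some (s, nd, dist)
          | some b => if dist ≤ b.2.2 then some (s, nd, dist) else best)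
        (none : Option (Int × (Int × Int) × Int)) with
      | some (s, nd, _) => (s, nd)
      | none => ((0 : Int), ((0 : Int), (0 : Int)))) =
      pvCoreB (if size < 288 then 288 else size) pvClH
    rw [alt_fold_eq, pvFilterH]; rfl


-- A's break-scan, carried over the (key, params) entries
def pvScanP (m : Int) : List (Int × Int × Int) → (Int × Int × Int) → (Int × Int × Int)
  | [], b => b
  | p :: rest, b => if |m - b.1| < |m - p.1| then b else pvScanP m rest p

-- valley fact: over increasing points, once the distance to m strictly grows it stays larger
lemma pvValley (m a c t : Int) (h1 : a < c) (h2 : c < t) (h3 : |m - a| < |m - c|) :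
    |m - a| < |m - t| := by
  rcases abs_cases (m - a) with ⟨ha, ha'⟩ | ⟨ha, ha'⟩ <;>
    rcases abs_cases (m - c) with ⟨hc, hc'⟩ | ⟨hc, hc'⟩ <;>
    rcases abs_cases (m - t) with ⟨ht, ht'⟩ | ⟨ht, ht'⟩ <;> omega

lemma pvScan_link (m : Int) :
    ∀ (cl : List (Int × Int × Int)) (b : Int × Int × Int),
      pvScan m (cl.map (·.1)) (|m - b.1|) b.1 = (pvScanP m cl b).1 := by
  intro cl
  induction cl with
  | nil => intro b; rfl
  | cons p rest ih =>
    intro b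
    have h0 : ¬ (|m - b.1| = -1) := by have := abs_nonneg (m - b.1); omega
    simp only [List.map_cons, pvScan, pvScanP]
    rw [if_neg h0]
    by_cases h : |m - b.1| < |m - p.1|
    · rw [if_pos h, if_pos h]
    · rw [if_neg h, if_neg h]
      exact ih p

lemma pvScanP_mem (m : Int) :
    ∀ (cl : List (Int × Int × Int)) (b : Int × Int × Int), pvScanP m cl b ∈ b :: cl := by
  intro cl
  induction cl with
  | nil => intro b; simp [pvScanP]
  | cons p rest ih =>
    intro b
    simp only [pvScanP]
    split
    · simp
    · have := ih p
      simp only [List.mem_cons] at this ⊢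
      tauto

-- once every remaining entry is farther than the stored best, the fold keeps the best
lemma pvBest_dead (m bd : Int) :
    ∀ (cl : List (Int × Int × Int)) (b : Int × Int × Int),
      (∀ p ∈ cl, ¬ |m - p.1| ≤ bd) →
      cl.foldl (pvBest m) (some (b.1, b.2, bd)) = some (b.1, b.2, bd) := by
  intro cl
  induction cl with
  | nil => intro b _; rfl
  | cons p rest ih =>
    intro b hfar
    rw [List.foldl_cons]
    have hstep : pvBest m (some (b.1, b.2, bd)) p = some (b.1, b.2, bd) := by
      simp only [pvBest]
      rw [if_neg (hfar p (by simp))]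
    rw [hstep]
    exact ih b (fun t ht => hfar t (by simp [ht]))

-- B's running-best fold computes exactly what A's break-scan computes, for sorted entries
lemma pvFold_eq_scanP (m : Int) :
    ∀ (cl : List (Int × Int × Int)) (b : Int × Int × Int),
      cl.Pairwise (fun p q => p.1 < q.1) → (∀ p ∈ cl, b.1 < p.1) →
      cl.foldl (pvBest m) (some (b.1, b.2, |m - b.1|)) =
        some ((pvScanP m cl b).1, (pvScanP m cl b).2, |m - (pvScanP m cl b).1|) := by
  intro cl
  induction cl with
  | nil => intro b _ _; rfl
  | cons p rest ih =>
    intro b hpw hgt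
    by_cases h : |m - b.1| < |m - p.1|
    · -- A breaks here; B never updates again
      simp only [pvScanP, if_pos h]
      rw [List.foldl_cons]
      have hstep : pvBest m (some (b.1, b.2, |m - b.1|)) p = some (b.1, b.2, |m - b.1|) := by
        simp only [pvBest]
        rw [if_neg (by omega)]
      rw [hstep]
      refine pvBest_dead m _ rest b (fun t ht => ?_)
      have h1 : b.1 < p.1 := hgt p (by simp)
      have h2 : p.1 < t.1 := (List.pairwise_cons.mp hpw).1 t ht
      have := pvValley m b.1 p.1 t.1 h1 h2 h
      omega
    · simp only [pvScanP, if_neg h]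
      rw [List.foldl_cons]
      have hstep : pvBest m (some (b.1, b.2, |m - b.1|)) p = some (p.1, p.2, |m - p.1|) := by
        simp only [pvBest]
        rw [if_pos (by omega)]
      rw [hstep]
      exact ih p hpw.of_cons (fun t ht => (List.pairwise_cons.mp hpw).1 t ht)

lemma pvCore_eq (m : Int) (c0 : Int × Int × Int) (rest : List (Int × Int × Int))
    (dd : PySem.Dict Int (Int × Int))
    (hpw : (c0 :: rest).Pairwise (fun p q => p.1 < q.1))
    (hdd : ∀ p ∈ c0 :: rest, dd.get? p.1 = some p.2) :
    pvCoreA m ((c0 :: rest).map (·.1)) dd = pvCoreB m (c0 :: rest) := by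
  have hq := pvScanP_mem m rest c0
  have hA : pvScan m (List.map (·.1) (c0 :: rest)) (-1) 0 = (pvScanP m rest c0).1 := by
    rw [List.map_cons]
    rw [show pvScan m (c0.1 :: List.map (·.1) rest) (-1) 0
          = pvScan m (List.map (·.1) rest) (|m - c0.1|) c0.1 from by
      simp only [pvScan]
      simp]
    exact pvScan_link m rest c0
  have hB : (c0 :: rest).foldl (pvBest m) none =
      some ((pvScanP m rest c0).1, (pvScanP m rest c0).2, |m - (pvScanP m rest c0).1|) := by
    rw [List.foldl_cons]
    have hstep : pvBest m none c0 = some (c0.1, c0.2, |m - c0.1|) := rfl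
    rw [hstep]
    exact pvFold_eq_scanP m rest c0 hpw.of_cons
      (fun t ht => (List.pairwise_cons.mp hpw).1 t ht)
  simp only [pvCoreA, pvCoreB, hA, hB]
  rw [hdd _ hq]
  rfl

lemma coreH (m : Int) : pvCoreA m pvKsH pvDH = pvCoreB m pvClH :=
  pvCore_eq m (288, (4, 15)) [(432, (2, 5)), (560, (14, 27)), (576, (8, 15)), (640, (16, 27)), (720, (2, 3)), (864, (4, 5)), (1008, (14, 15))] pvDH (by decide) (by decide)

lemma coreW (m : Int) : pvCoreA m pvKsW pvDW = pvCoreB m pvClW :=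
  pvCore_eq m (288, (3, 20)) [(320, (1, 6)), (352, (11, 60)), (384, (1, 5)), (416, (13, 60)), (448, (7, 30)), (480, (1, 4)), (512, (4, 15)), (576, (3, 10)), (640, (1, 3)), (672, (7, 20)), (704, (11, 30)), (768, (2, 5)), (800, (5, 12)), (832, (13, 30)), (864, (9, 20)), (896, (7, 15)), (960, (1, 2)), (1024, (8, 15)), (1056, (11, 20)), (1120, (7, 12)), (1152, (3, 5)), (1248, (13, 20)), (1280, (2, 3)), (1344, (7, 10)), (1408, (11, 15)), (1440, (3, 4)), (1536, (4, 5)), (1600, (5, 6)), (1664, (13, 15)), (1728, (9, 10)), (1760, (11, 12)), (1792, (14, 15))] pvDW (by decide) (by decide)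

-- ===== VERDICT (by name: the statement is the Claim_ definition above) =====
theorem find_isp_scale_params_spec : Claim_equal_find_isp_scale_params := by
  intro size h _
  unfold Spec_find_isp_scale_params
  rw [portA_eq, portB_eq]
  cases h
  · simpa using coreW (if size < 288 then 288 else size)
  · simpa using coreH (if size < 288 then 288 else size)
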